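-- pv_equiv track=rewrite | github.com/algosup/2022-2023-project-3-harfang3d-binding-Project-5-group | lang/rust.py | clean_name_with_title
-- ===== SOURCE A (Python) =====
-- def clean_name_with_title(name, type):
--     '''
--     This function is used to clean the name of the function and the type of the function, to format everything
--
--     However in rust, there is 2 keywords with a problem, "'union" and "Self" which is different from self, we need to handle both of them differently
--     '''
--
--     # method to let the function support the keywords
--     new_name = ""
--     if type == "Self":
--         pass
--     elif type == "'union":
--         pass
--     elif type == "self":
--         pass
--
--     elif "_" in name:
--         next_is_forced_uppercase = True
--         for c in name:
--             if c == "_":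
--                 next_is_forced_uppercase = True
--             elif next_is_forced_uppercase:
--                 new_name += c.capitalize()
--                 next_is_forced_uppercase = False
--             else:
--                 new_name += c
--     else:
--         first_letter_checked = False
--         for c in name:
--             if c in ["&", "*"] or first_letter_checked:
--                 new_name += c
--             elif not first_letter_checked:
--                 first_letter_checked = True
--                 new_name += c.capitalize()
--     return new_name.strip().replace("_", "").replace(":", "")
-- ===== SOURCE B (Python) =====
-- def clean_name_with_title(name, type):
--     # Same task as A, by decomposition: split-on-underscore segments / slice
--     # arithmetic instead of A's per-character state-machine loops.
--     if type in ("Self", "'union", "self"):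
--         return ""
--     if "_" in name:
--         out = "".join(seg[:1].upper() + seg[1:] for seg in name.split("_"))
--     else:
--         i = len(name) - len(name.lstrip("&*"))
--         out = name[:i] + name[i:i + 1].upper() + name[i + 1:]
--     return out.strip().replace("_", "").replace(":", "")
-- ===== Notes on version B (the rewrite author's own statement) =====
-- stated objective: idiomatic
-- what changed: Replaces A's two per-character state-machine loops (a forced-uppercase flag after '_', a first-letter-seen flag) with slice operations: split on '_' and capitalize each segment via seg[:1].upper()+seg[1:], or measure the leading '&'/'*' run with lstrip and capitalize the first character after it.
import Mathlib
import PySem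

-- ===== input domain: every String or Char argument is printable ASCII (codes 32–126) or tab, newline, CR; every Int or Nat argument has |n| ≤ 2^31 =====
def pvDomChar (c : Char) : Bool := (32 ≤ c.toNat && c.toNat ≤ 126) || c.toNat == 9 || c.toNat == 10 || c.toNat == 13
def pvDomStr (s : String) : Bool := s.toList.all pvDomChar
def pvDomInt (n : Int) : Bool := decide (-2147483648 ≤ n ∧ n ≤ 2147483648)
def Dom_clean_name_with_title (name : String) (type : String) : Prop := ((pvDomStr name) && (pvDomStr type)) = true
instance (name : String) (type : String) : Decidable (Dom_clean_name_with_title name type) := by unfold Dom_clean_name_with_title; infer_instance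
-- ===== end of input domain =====

-- B replaces A's two per-character state-machine loops by split-on-'_' /
-- leading-run slice arithmetic (objective: idiomatic; same O(n) cost).

-- ===== PORT A =====
-- per-character loops ported as foldl over (accumulated chars, flag);
-- single-char str.capitalize() ported as PySem.Chars.upperChar (exact on ASCII)
def clean_name_with_title (name : String) (type : String) : String :=
  let nl := name.toList
  let new_name : List Char :=
    if type == "Self" then []
    else if type == "'union" then []
    else if type == "self" then []
    else if PySem.Chars.isIn ['_'] nl then
      (nl.foldl (fun (s : List Char × Bool) c =>
        if c == '_' then (s.1, true)
        else if s.2 then (s.1 ++ [PySem.Chars.upperChar c], false)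
        else (s.1 ++ [c], s.2)) ([], true)).1
    else
      (nl.foldl (fun (s : List Char × Bool) c =>
        if (c == '&' || c == '*') || s.2 then (s.1 ++ [c], s.2)
        else (s.1 ++ [PySem.Chars.upperChar c], true)) ([], false)).1
  String.ofList (PySem.Chars.replace (PySem.Chars.replace (PySem.Chars.strip new_name) ['_'] []) [':'] [])

-- ===== PORT B =====
-- name.lstrip("&*") ported as dropWhile of '&'/'*' (exact: lstrip with a char set);
-- the slices name[:i], name[i:i+1], name[i+1:] with 0 ≤ i ≤ len(name) ported as take/drop (exact there)
def clean_name_with_title_alt (name : String) (type : String) : String :=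
  if type == "Self" || type == "'union" || type == "self" then ""
  else
    let nl := name.toList
    let out : List Char :=
      if PySem.Chars.isIn ['_'] nl then
        PySem.Chars.join [] ((PySem.Chars.splitOn nl ['_']).map
          (fun seg => PySem.Chars.upper (seg.take 1) ++ seg.drop 1))
      else
        let i := nl.length - (nl.dropWhile (fun c => c == '&' || c == '*')).length
        nl.take i ++ PySem.Chars.upper ((nl.drop i).take 1) ++ nl.drop (i + 1)
    String.ofList (PySem.Chars.replace (PySem.Chars.replace (PySem.Chars.strip out) ['_'] []) [':'] [])

-- ===== PRECONDITION & SPEC =====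
def Spec_clean_name_with_title (name : String) (type : String) (out : String) : Prop := out = clean_name_with_title_alt name type
instance (name : String) (type : String) (out : String) : Decidable (Spec_clean_name_with_title name type out) := by unfold Spec_clean_name_with_title; infer_instance

-- ===== CLAIM (what is proved, stated in full; the proofs are below) =====
def Claim_equal_clean_name_with_title : Prop := ∀ (name : String) (type : String), Dom_clean_name_with_title name type → Spec_clean_name_with_title name type (clean_name_with_title name type)

-- ===== LEMMAS AND PROOFS =====

-- the list of '_'-separated segments of l, pre = segment accumulated so far
def pvSegs : List Char → List Char → List (List Char)
  | pre, [] => [pre]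
  | pre, c :: t => if c == '_' then pre :: pvSegs [] t else pvSegs (pre ++ [c]) t

-- what A's underscore loop emits: flag = "next char is forced uppercase"
def pvJ : Bool → List Char → List Char
  | _, [] => []
  | flag, c :: t =>
    if c == '_' then pvJ true t
    else if flag then PySem.Chars.upperChar c :: pvJ false t
    else c :: pvJ false t

def pvCapSeg (seg : List Char) : List Char := PySem.Chars.upper (seg.take 1) ++ seg.drop 1

lemma pvJ_cons_ne (flag : Bool) (c : Char) (t : List Char) (h : ¬ c = '_') :
    pvJ flag (c :: t) = (if flag then PySem.Chars.upperChar c :: pvJ false t else c :: pvJ false t) := by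
  simp [pvJ, h]

lemma splitOn_go_eq (fuel : Nat) : ∀ (l cur : List Char) (hres : List (List Char)),
    l.length < fuel →
    PySem.Chars.splitOn.go ['_'] fuel l cur hres = hres.reverse ++ pvSegs cur.reverse l := by
  induction fuel with
  | zero => intro l cur hres h; omega
  | succ n ih =>
    intro l cur hres h
    cases l with
    | nil => simp [PySem.Chars.splitOn.go, pvSegs]
    | cons c t =>
      by_cases hc : c = '_'
      · subst hc
        rw [PySem.Chars.splitOn.go]
        rw [if_pos (by simp [List.isPrefixOf])]
        rw [ih _ _ _ (by simp at h ⊢; omega)]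
        simp [pvSegs]
      · rw [PySem.Chars.splitOn.go]
        rw [if_neg (by simp [List.isPrefixOf]; exact fun hh => (hc hh.symm).elim)]
        rw [ih _ _ _ (by simp at h ⊢; omega)]
        simp [pvSegs, hc]

lemma splitOn_eq_pvSegs (l : List Char) : PySem.Chars.splitOn l ['_'] = pvSegs [] l := by
  have := splitOn_go_eq (l.length + 1) l [] [] (by omega)
  simpa [PySem.Chars.splitOn] using this

lemma join_nil_cons (x : List Char) (xs : List (List Char)) :
    PySem.Chars.join [] (x :: xs) = x ++ PySem.Chars.join [] xs := by
  cases xs with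
  | nil => simp [PySem.Chars.join, List.intercalate]
  | cons y ys => simp [PySem.Chars.join, List.intercalate]

lemma pvCapSeg_append (pre : List Char) (c : Char) :
    pvCapSeg (pre ++ [c]) = pvCapSeg pre ++ (if pre = [] then [PySem.Chars.upperChar c] else [c]) := by
  cases pre <;> simp [pvCapSeg, PySem.Chars.upper]

lemma joincap_segs (l : List Char) : ∀ pre,
    PySem.Chars.join [] ((pvSegs pre l).map pvCapSeg)
      = pvCapSeg pre ++ (if pre = [] then pvJ true l else pvJ false l) := by
  induction l with
  | nil => intro pre; simp [pvSegs, pvJ, PySem.Chars.join, List.intercalate]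
  | cons c t ih =>
    intro pre
    by_cases hc : c = '_'
    · subst hc
      simp only [pvSegs, beq_self_eq_true, if_true, List.map_cons]
      rw [join_nil_cons, ih []]
      simp [pvCapSeg, pvJ, PySem.Chars.upper]
    · rw [pvSegs, if_neg (by simpa using hc), ih (pre ++ [c]),
          pvCapSeg_append, pvJ_cons_ne _ _ _ hc, pvJ_cons_ne _ _ _ hc]
      cases pre <;> simp

lemma foldA_eq (l : List Char) : ∀ (acc : List Char) (flag : Bool),
    (l.foldl (fun (s : List Char × Bool) c =>
        if c == '_' then (s.1, true)
        else if s.2 then (s.1 ++ [PySem.Chars.upperChar c], false)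
        else (s.1 ++ [c], s.2)) (acc, flag)).1 = acc ++ pvJ flag l := by
  induction l with
  | nil => intro acc flag; simp [pvJ]
  | cons c t ih =>
    intro acc flag
    simp only [List.foldl_cons]
    by_cases hc : c = '_'
    · rw [if_pos (by simp [hc]), ih]
      simp only [pvJ]
      rw [if_pos (by simp [hc])]
    · rw [if_neg (by simp [hc]), pvJ_cons_ne _ _ _ hc]
      cases flag
      · rw [if_neg (by simp), ih]; simp
      · rw [if_pos rfl, ih]; simp

lemma foldC_true (l : List Char) : ∀ (acc : List Char),
    (l.foldl (fun (s : List Char × Bool) c =>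
        if (c == '&' || c == '*') || s.2 then (s.1 ++ [c], s.2)
        else (s.1 ++ [PySem.Chars.upperChar c], true)) (acc, true)).1 = acc ++ l := by
  induction l with
  | nil => intro acc; simp
  | cons c t ih => intro acc; simp only [List.foldl_cons, Bool.or_true, if_true]; rw [ih]; simp

lemma foldC_false (l : List Char) : ∀ (acc : List Char),
    (l.foldl (fun (s : List Char × Bool) c =>
        if (c == '&' || c == '*') || s.2 then (s.1 ++ [c], s.2)
        else (s.1 ++ [PySem.Chars.upperChar c], true)) (acc, false)).1
      = acc ++ l.takeWhile (fun c => c == '&' || c == '*')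
            ++ (PySem.Chars.upper ((l.dropWhile (fun c => c == '&' || c == '*')).take 1)
                ++ (l.dropWhile (fun c => c == '&' || c == '*')).drop 1) := by
  induction l with
  | nil => intro acc; simp [PySem.Chars.upper]
  | cons c t ih =>
    intro acc
    by_cases hc : (c == '&' || c == '*') = true
    · simp only [List.foldl_cons, hc, Bool.true_or, if_true, List.takeWhile_cons, List.dropWhile_cons]
      rw [ih]; simp
    · simp only [List.foldl_cons, hc, Bool.false_or, Bool.false_eq_true, if_false,
                 List.takeWhile_cons, List.dropWhile_cons]
      rw [foldC_true]
      simp [PySem.Chars.upper]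

lemma branch3_eq (nl : List Char) :
    (nl.take (nl.length - (nl.dropWhile (fun c => c == '&' || c == '*')).length)
      ++ PySem.Chars.upper ((nl.drop (nl.length - (nl.dropWhile (fun c => c == '&' || c == '*')).length)).take 1)
      ++ nl.drop (nl.length - (nl.dropWhile (fun c => c == '&' || c == '*')).length + 1))
    = nl.takeWhile (fun c => c == '&' || c == '*')
        ++ (PySem.Chars.upper ((nl.dropWhile (fun c => c == '&' || c == '*')).take 1)
            ++ (nl.dropWhile (fun c => c == '&' || c == '*')).drop 1) := by
  set p := fun c : Char => c == '&' || c == '*' with hp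
  have hsplit : nl.takeWhile p ++ nl.dropWhile p = nl := List.takeWhile_append_dropWhile
  have hlen : (nl.takeWhile p).length + (nl.dropWhile p).length = nl.length := by
    have := congrArg List.length hsplit
    rw [List.length_append] at this
    exact this
  have hi : nl.length - (nl.dropWhile p).length = (nl.takeWhile p).length := by omega
  have htake := @List.take_left Char (nl.takeWhile p) (nl.dropWhile p)
  rw [hsplit] at htake
  have hdrop := @List.drop_left Char (nl.takeWhile p) (nl.dropWhile p)
  rw [hsplit] at hdrop
  have hdrop1 : nl.drop ((nl.takeWhile p).length + 1) = (nl.dropWhile p).drop 1 := by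
    rw [← hdrop, List.drop_drop, Nat.add_comm]
  rw [hi, htake, hdrop, hdrop1, List.append_assoc]

-- ===== VERDICT (by name: the statement is the Claim_ definition above) =====
set_option maxHeartbeats 1000000 in
theorem clean_name_with_title_spec : Claim_equal_clean_name_with_title := by
  intro name type _
  simp only [Spec_clean_name_with_title, clean_name_with_title, clean_name_with_title_alt]
  by_cases h1 : type == "Self"
  · simp only [h1, Bool.true_or, if_true]; decide
  · by_cases h2 : type == "'union"
    · simp only [h1, h2, Bool.false_or, Bool.true_or, if_true, Bool.false_eq_true, if_false]; decide
    · by_cases h3 : type == "self"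
      · simp only [h1, h2, h3, Bool.false_or, if_true, Bool.false_eq_true, if_false]
        decide
      · simp only [h1, h2, h3, Bool.false_or, Bool.false_eq_true, if_false]
        have hcap : (fun seg : List Char => PySem.Chars.upper (seg.take 1) ++ seg.drop 1) = pvCapSeg := rfl
        by_cases hu : PySem.Chars.isIn ['_'] name.toList
        · simp only [hu, if_true]
          rw [foldA_eq, splitOn_eq_pvSegs, hcap, joincap_segs]
          simp [pvCapSeg, PySem.Chars.upper]
        · simp only [hu, Bool.false_eq_true, if_false]
          rw [foldC_false, branch3_eq]
          simp
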